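-- pv_equiv track=rewrite | github.com/MartinDch24/Fundamentals | Functions - Exercise/min_max_and_sum.py | min_max_and_sum
-- ===== SOURCE A (Python) =====
-- def min_max_and_sum(some_list: list) -> int:
--     int_numbers = []
--     for number in some_list:
--         int_numbers.append(int(number))
--     smallest = min(int_numbers)
--     largest = max(int_numbers)
--     sum_of_numbers = sum(int_numbers)
--     return smallest, largest, sum_of_numbers
-- ===== SOURCE B (Python) =====
-- def min_max_and_sum(some_list: list) -> int:
--     smallest = largest = total = int(some_list[0])
--     for number in some_list[1:]:
--         n = int(number)
--         if n < smallest: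
--             smallest = n
--         if n > largest:
--             largest = n
--         total += n
--     return smallest, largest, total
-- ===== Notes on version B (the rewrite author's own statement) =====
-- stated objective: alternative
-- what changed: Single pass maintaining running min/max/total seeded from the first element, instead of materialising a converted list and scanning it three times with min()/max()/sum().
import Mathlib
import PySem

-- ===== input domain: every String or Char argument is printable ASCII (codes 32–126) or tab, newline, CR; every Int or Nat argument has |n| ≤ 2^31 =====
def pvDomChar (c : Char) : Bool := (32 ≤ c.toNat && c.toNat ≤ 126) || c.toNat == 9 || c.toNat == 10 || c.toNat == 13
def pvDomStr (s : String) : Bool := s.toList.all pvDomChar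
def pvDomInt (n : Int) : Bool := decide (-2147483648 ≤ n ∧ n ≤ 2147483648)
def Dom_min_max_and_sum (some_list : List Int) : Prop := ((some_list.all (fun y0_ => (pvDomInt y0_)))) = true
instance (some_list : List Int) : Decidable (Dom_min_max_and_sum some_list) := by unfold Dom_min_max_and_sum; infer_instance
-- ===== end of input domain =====

-- B computes min, max and sum in one pass over the list instead of A's list build + three scans (alternative decomposition; return value only).

-- ===== PORT A =====
def min_max_and_sum (some_list : List Int) : Int × Int × Int :=
  let int_numbers := some_list.foldl (fun acc number => acc ++ [number]) []
  match PySem.List.min? int_numbers (fun x => x), PySem.List.max? int_numbers (fun x => x) with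
  | some smallest, some largest => (smallest, largest, int_numbers.sum)
  | _, _ => (0, 0, 0)   -- unreachable under Pre_ (empty list: min() raises ValueError)

-- ===== PORT B =====
def min_max_and_sum_alt (some_list : List Int) : Int × Int × Int :=
  match PySem.List.pyGet? some_list 0 with
  | none => (0, 0, 0)   -- unreachable under Pre_ (empty list: some_list[0] raises IndexError)
  | some first =>
    (PySem.List.slice some_list (some 1) none).foldl
      (fun (st : Int × Int × Int) n =>
        let smallest := if n < st.1 then n else st.1
        let largest := if n > st.2.1 then n else st.2.1
        (smallest, largest, st.2.2 + n))
      (first, first, first)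

-- ===== PRECONDITION & SPEC =====
-- Pre_ excludes exactly the empty list, on which A raises ValueError (min of empty sequence).
def Pre_min_max_and_sum (some_list : List Int) : Prop := some_list ≠ []
instance (some_list : List Int) : Decidable (Pre_min_max_and_sum some_list) := by unfold Pre_min_max_and_sum; infer_instance
def pvWitness_min_max_and_sum : List Int := [3, -1, 4]
def Spec_min_max_and_sum (some_list : List Int) (out : Int × Int × Int) : Prop := out = min_max_and_sum_alt some_list
instance (some_list : List Int) (out : Int × Int × Int) : Decidable (Spec_min_max_and_sum some_list out) := by unfold Spec_min_max_and_sum; infer_instance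

-- ===== CLAIM (what is proved, stated in full; the proofs are below) =====
def Claim_equal_min_max_and_sum : Prop := ∀ (some_list : List Int), Dom_min_max_and_sum some_list → Pre_min_max_and_sum some_list → Spec_min_max_and_sum some_list (min_max_and_sum some_list)

-- ===== LEMMAS AND PROOFS =====
theorem pv_foldl_append (l : List Int) (a : List Int) :
    l.foldl (fun acc x => acc ++ [x]) a = a ++ l := by
  induction l generalizing a with
  | nil => simp
  | cons h t ih => simp [List.foldl, ih]

theorem pv_fold_triple (t : List Int) (a b c : Int) :
    t.foldl (fun (st : Int × Int × Int) n =>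
        let smallest := if n < st.1 then n else st.1
        let largest := if n > st.2.1 then n else st.2.1
        (smallest, largest, st.2.2 + n)) (a, b, c)
      = (t.foldl min a, t.foldl max b, c + t.sum) := by
  induction t generalizing a b c with
  | nil => simp
  | cons h t ih =>
    have hmin : (if h < a then h else a) = min a h := by rw [min_def]; split_ifs <;> omega
    have hmax : (if h > b then h else b) = max b h := by rw [max_def]; split_ifs <;> omega
    simp only [List.foldl, ih, hmin, hmax, List.sum_cons]
    simp [add_assoc]

theorem min_max_and_sum_eq (h : Int) (t : List Int) :
    min_max_and_sum (h :: t) = min_max_and_sum_alt (h :: t) := by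
  simp only [min_max_and_sum, min_max_and_sum_alt, pv_foldl_append, List.nil_append,
    PySem.List.min?_id_cons, PySem.List.max?_id_cons, PySem.List.pyGet?_zero_cons,
    PySem.List.slice_from_one, List.tail_cons, pv_fold_triple]
  simp [List.sum_cons]

-- ===== VERDICT (by name: the statement is the Claim_ definition above) =====
theorem min_max_and_sum_spec : Claim_equal_min_max_and_sum := by
  intro some_list _ hpre
  cases some_list with
  | nil => exact absurd rfl hpre
  | cons h t => exact min_max_and_sum_eq h t
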